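-- pv_equiv track=rewrite | github.com/Keyao7/DD2520-Applied-Cryptography | Cryptopals/Method_Collection.py | detectRepeatedBlocks
-- ===== SOURCE A (Python) =====
-- def detectRepeatedBlocks(text):
--     most_block_count = 0
--     block_dic = {}
--     for i in range(0,len(text), 16):
--         if text[i:i+16] in block_dic.keys():
--             block_dic[text[i:i+16]] += 1
--         else:
--             block_dic[text[i:i+16]] = 0
--     if sum(block_dic.values()) > most_block_count:
--         most_block_count = sum(block_dic.values())
--     return most_block_count
-- ===== SOURCE B (Python) =====
-- def detectRepeatedBlocks(text):
--     # Sort the 16-byte blocks, then count adjacent equal pairs: in a sorted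
--     # list every duplicate occurrence sits next to a copy, so the number of
--     # adjacent equal pairs equals total blocks minus distinct blocks, which
--     # is exactly A's sum of per-block excess counts.
--     blocks = sorted(text[i:i+16] for i in range(0, len(text), 16))
--     return sum(1 for prev, cur in zip(blocks, blocks[1:]) if prev == cur)
-- ===== Notes on version B (the rewrite author's own statement) =====
-- stated objective: alternative
-- what changed: Replaces A's dictionary branch-and-increment counting with a sort-then-scan: sort the 16-byte blocks and count adjacent equal pairs, which equals A's sum of excess occurrence counts.
import Mathlib
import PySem

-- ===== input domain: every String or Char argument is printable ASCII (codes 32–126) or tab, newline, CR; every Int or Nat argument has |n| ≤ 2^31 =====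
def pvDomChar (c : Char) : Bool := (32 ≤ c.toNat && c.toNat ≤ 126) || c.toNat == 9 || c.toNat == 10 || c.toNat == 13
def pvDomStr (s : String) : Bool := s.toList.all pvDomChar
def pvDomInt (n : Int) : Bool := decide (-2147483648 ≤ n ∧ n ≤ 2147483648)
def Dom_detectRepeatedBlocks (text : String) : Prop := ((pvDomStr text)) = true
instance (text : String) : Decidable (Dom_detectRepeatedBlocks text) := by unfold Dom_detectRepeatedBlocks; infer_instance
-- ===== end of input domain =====

-- B sorts the 16-byte blocks and counts adjacent equal pairs instead of A's
-- dictionary branch-and-increment counting (objective: alternative algorithm).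

-- ===== PORT A =====
-- loop body: if text[i:i+16] in block_dic.keys(): block_dic[b] += 1 else: block_dic[b] = 0
def detectRBStep (d : PySem.Dict String Int) (b : String) : PySem.Dict String Int :=
  if d.contains b then d.insert b (d.getD b 0 + 1) else d.insert b 0

def detectRepeatedBlocks (text : String) : Int :=
  let most_block_count : Int := 0
  let block_dic : PySem.Dict String Int :=
    (PySem.List.pyRange 0 (PySem.Str.len text) 16).foldl
      (fun d i => detectRBStep d (PySem.Str.slice text (some i) (some (i + 16))))
      PySem.Dict.empty
  if block_dic.values.sum > most_block_count then block_dic.values.sum else most_block_count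

-- ===== PORT B =====
def detectRepeatedBlocks_alt (text : String) : Int :=
  let blocks :=
    PySem.List.sorted
      ((PySem.List.pyRange 0 (PySem.Str.len text) 16).map
        (fun i => PySem.Str.slice text (some i) (some (i + 16))))
      (fun x => x) false
  ((blocks.zip (PySem.List.slice blocks (some 1) none)).map
      (fun p => if p.1 == p.2 then (1 : Int) else 0)).sum

-- ===== PRECONDITION & SPEC =====
def Spec_detectRepeatedBlocks (text : String) (out : Int) : Prop := out = detectRepeatedBlocks_alt text
instance (text : String) (out : Int) : Decidable (Spec_detectRepeatedBlocks text out) := by unfold Spec_detectRepeatedBlocks; infer_instance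

-- ===== CLAIM =====
def Claim_equal_detectRepeatedBlocks : Prop := ∀ (text : String), Dom_detectRepeatedBlocks text → Spec_detectRepeatedBlocks text (detectRepeatedBlocks text)

-- ===== LEMMAS AND PROOFS =====

-- replacing the (unique) pair with key b in an items list changes the value sum by (w - v)
lemma sum_replace (l : List (String × Int)) (b : String) (v w : Int)
    (hnd : (l.map Prod.fst).Nodup) (hmem : (b, v) ∈ l) :
    ((l.map (fun p => if p.1 == b then (b, w) else p)).map (·.2)).sum
      = (l.map (·.2)).sum - v + w := by
  induction l with
  | nil => simp at hmem
  | cons p l ih =>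
    simp only [List.map_cons, List.nodup_cons, List.mem_map] at hnd
    simp only [List.map_cons, List.sum_cons, beq_iff_eq]
    simp only [beq_iff_eq] at ih
    rcases List.mem_cons.1 hmem with h | h
    · have hp : p = (b, v) := h.symm
      subst hp
      rw [if_pos rfl]
      have hmapid : l.map (fun q => if q.1 = b then (b, w) else q) = l := by
        conv_rhs => rw [← List.map_id l]
        refine List.map_congr_left ?_
        intro q hq
        have hq1 : q.1 ≠ b := fun e => hnd.1 ⟨q, hq, e⟩
        simp [hq1]
      rw [hmapid]; simp; ring
    · have hpb : p.1 ≠ b := by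
        rintro rfl
        exact hnd.1 ⟨(p.1, v), h, rfl⟩
      rw [if_neg hpb, ih hnd.2 h]; ring

-- A's loop invariant: dict value sum + distinct count = processed blocks + initial keys
lemma loop_sum (bs : List String) (d : PySem.Dict String Int) (hnd : d.keys.Nodup) :
    ((bs.foldl detectRBStep d).values.sum : Int)
      + ((PySem.Set.update d.keys bs).length : Int)
      = d.values.sum + (bs.length : Int) + (d.keys.length : Int) := by
  induction bs generalizing d with
  | nil => simp [PySem.Set.update]
  | cons b bs ih =>
    by_cases h : d.contains b = true
    · have hget : ∃ v, d.get? b = some v := by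
        rw [← Option.isSome_iff_exists, ← PySem.Dict.contains_eq_isSome_get?]; exact h
      obtain ⟨v, hv⟩ := hget
      have hmem : (b, v) ∈ d.items := PySem.Dict.mem_items_of_get?_eq_some _ hv
      have hgetD : d.getD b 0 = v := PySem.Dict.getD_of_get?_eq_some _ _ hv
      have hbk : b ∈ d.keys := (PySem.Dict.contains_iff_mem_keys _ _).1 h
      have hstep : detectRBStep d b = d.insert b (v + 1) := by
        simp [detectRBStep, h, hgetD]
      have hkeys : (d.insert b (v + 1)).keys = d.keys :=
        PySem.Dict.keys_insert_of_contains _ _ h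
      have hitems : (d.insert b (v + 1)).items
          = d.items.map (fun p => if p.1 == b then (b, v + 1) else p) :=
        PySem.Dict.items_insert_of_contains _ _ h
      have hsum : (d.insert b (v + 1)).values.sum = d.values.sum + 1 := by
        simp only [PySem.Dict.values, hitems]
        rw [sum_replace d.items b v (v + 1) hnd hmem]; ring
      have hadd : PySem.Set.add d.keys b = d.keys := by
        simp [PySem.Set.add, PySem.Set.contains, hbk]
      have hrec := ih (d.insert b (v + 1)) (by rw [hkeys]; exact hnd)
      rw [hkeys, hsum] at hrec
      simp only [PySem.Set.update, List.foldl_cons, hstep] at hrec ⊢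
      rw [hadd, hrec]
      simp [List.length_cons]; ring
    · have hstep : detectRBStep d b = d.insert b 0 := by
        simp [detectRBStep, h]
      have hkeys : (d.insert b 0).keys = d.keys ++ [b] :=
        PySem.Dict.keys_insert_of_not_contains _ _ (by simpa using h)
      have hitems : (d.insert b 0).items = d.items ++ [(b, 0)] :=
        PySem.Dict.items_insert_of_not_contains _ _ (by simpa using h)
      have hsum : (d.insert b 0).values.sum = d.values.sum := by
        simp [PySem.Dict.values, hitems]
      have hbk : b ∉ d.keys := fun hm => h ((PySem.Dict.contains_iff_mem_keys _ _).2 hm)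
      have hadd : PySem.Set.add d.keys b = d.keys ++ [b] := by
        simp [PySem.Set.add, PySem.Set.contains, hbk]
      have hnd' : (d.insert b 0).keys.Nodup := by
        rw [hkeys]; simpa [List.nodup_append] using And.intro hnd (by intro a ha e; exact hbk (e ▸ ha))
      have hrec := ih (d.insert b 0) hnd'
      rw [hkeys, hsum] at hrec
      simp only [PySem.Set.update, List.foldl_cons, hstep] at hrec ⊢
      rw [hadd, hrec]
      simp [List.length_cons, List.length_append]; ring

-- distinct count as a Finset cardinality (permutation-invariant form)
lemma setlen_eq_card (l : List String) :
    ((PySem.Set.ofList l).length : Int) = (l.toFinset.card : Int) := by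
  have hnd : (PySem.Set.ofList l).Nodup := PySem.Set.nodup_ofList l
  have hfs : (PySem.Set.ofList l).toFinset = l.toFinset := by
    ext x; simp [List.mem_toFinset, PySem.Set.mem_ofList]
  rw [← List.toFinset_card_of_nodup hnd, hfs]

-- B's scan: on a sorted list, adjacent-equal-pair count + distinct count = length
lemma adj_sorted (s : List String) (h : s.Pairwise (· ≤ ·)) :
    ((s.zip s.tail).map (fun p => if p.1 == p.2 then (1 : Int) else 0)).sum
      + (s.toFinset.card : Int) = (s.length : Int) := by
  induction s with
  | nil => simp
  | cons a t ih =>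
    cases t with
    | nil => simp
    | cons b u =>
      have h' : (b :: u).Pairwise (· ≤ ·) := h.tail
      have hab : a ≤ b := (List.pairwise_cons.1 h).1 b (by simp)
      have hrec := ih h'
      simp only [List.tail_cons, List.zip_cons_cons, List.map_cons, List.sum_cons] at hrec ⊢
      by_cases hq : a = b
      · subst hq
        simp only [List.toFinset_cons, Finset.insert_idem, beq_iff_eq, List.length_cons] at hrec ⊢
        simp only [if_true]
        push_cast at hrec ⊢
        omega
      · have hnm : a ∉ b :: u := by
          intro hm
          rcases List.mem_cons.1 hm with rfl | hm
          · exact hq rfl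
          · have hbu : b ≤ a := ((List.pairwise_cons.1 h').1 a hm)
            exact hq (le_antisymm hab hbu)
        have hfs : (a :: b :: u).toFinset.card = (b :: u).toFinset.card + 1 := by
          rw [List.toFinset_cons, Finset.card_insert_of_notMem (by simpa using hnm)]
        simp only [beq_iff_eq, List.length_cons] at hrec ⊢
        rw [if_neg hq, hfs]
        push_cast at hrec ⊢
        omega

-- ===== VERDICT =====
theorem detectRepeatedBlocks_spec : Claim_equal_detectRepeatedBlocks := by
  intro text _
  unfold Spec_detectRepeatedBlocks
  simp only [detectRepeatedBlocks, detectRepeatedBlocks_alt]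
  set g := fun i : Int => PySem.Str.slice text (some i) (some (i + 16)) with hg
  set l := PySem.List.pyRange 0 (PySem.Str.len text) 16 with hl
  -- A's side: dict value sum = blocks - distinct
  have hfold : l.foldl (fun d i => detectRBStep d (g i)) PySem.Dict.empty
      = (l.map g).foldl detectRBStep PySem.Dict.empty := by
    rw [List.foldl_map]
  have hA := loop_sum (l.map g) PySem.Dict.empty PySem.Dict.nodup_keys_empty
  have hv0 : (PySem.Dict.empty : PySem.Dict String Int).values.sum = 0 := rfl
  have hk0 : (PySem.Dict.empty : PySem.Dict String Int).keys.length = 0 := rfl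
  rw [hv0, hk0, PySem.Dict.keys_empty, PySem.Set.update_nil_left] at hA
  -- B's side: sorted adjacent-pair count = blocks - distinct
  set s := PySem.List.sorted (l.map g) (fun x => x) false with hs
  have hperm : s.Perm (l.map g) := PySem.List.sorted_perm _ _ _
  have hpw : s.Pairwise (· ≤ ·) := by
    simpa using PySem.List.sorted_pairwise (l.map g) (fun x => x)
  have hB := adj_sorted s hpw
  rw [PySem.List.slice_from_one] at *
  have hlen : s.length = (l.map g).length := hperm.length_eq
  have hcard : s.toFinset = (l.map g).toFinset := by
    ext x; simp [hperm.mem_iff]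
  have hset := setlen_eq_card (l.map g)
  have hle : (PySem.Set.ofList (l.map g)).length ≤ (l.map g).length :=
    PySem.Set.length_ofList_le _
  rw [hfold]
  rw [hcard, hlen] at hB
  split_ifs with hpos <;> omega
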